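-- pv_equiv track=rewrite | github.com/Nimadamus/nimadamus.github.io | scripts/desktop_mlb_props_sync.py | prioritize_markets
-- ===== SOURCE A (Python) =====
-- from typing import Any, Dict, Iterable, List
--
-- OFFICIAL_PRIORITY_MARKETS = [
--     "pitcher_strikeouts",
--     "pitcher_outs",
-- ]
--
-- def prioritize_markets(markets: List[str]) -> List[str]:
--     ordered: list[str] = []
--     seen: set[str] = set()
--     for market in OFFICIAL_PRIORITY_MARKETS:
--         if market in markets and market not in seen:
--             ordered.append(market)
--             seen.add(market)
--     for market in markets:
--         if market not in seen:
--             ordered.append(market)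
--             seen.add(market)
--     return ordered
-- ===== SOURCE B (Python) =====
-- OFFICIAL_PRIORITY_MARKETS = [
--     "pitcher_strikeouts",
--     "pitcher_outs",
-- ]
--
-- def prioritize_markets(markets):
--     deduped = list(dict.fromkeys(markets))
--     fallback = len(OFFICIAL_PRIORITY_MARKETS)
--     def rank(market):
--         if market in OFFICIAL_PRIORITY_MARKETS:
--             return OFFICIAL_PRIORITY_MARKETS.index(market)
--         return fallback
--     return sorted(deduped, key=rank)
-- ===== Notes on version B (the rewrite author's own statement) =====
-- stated objective: simpler
-- what changed: Replaces A's two seen-set filtering passes (priority scan then market scan) by an insertion-order dedupe followed by one stable sort keyed by each market's index in OFFICIAL_PRIORITY_MARKETS (fallback len for non-priority markets).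
import Mathlib
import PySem

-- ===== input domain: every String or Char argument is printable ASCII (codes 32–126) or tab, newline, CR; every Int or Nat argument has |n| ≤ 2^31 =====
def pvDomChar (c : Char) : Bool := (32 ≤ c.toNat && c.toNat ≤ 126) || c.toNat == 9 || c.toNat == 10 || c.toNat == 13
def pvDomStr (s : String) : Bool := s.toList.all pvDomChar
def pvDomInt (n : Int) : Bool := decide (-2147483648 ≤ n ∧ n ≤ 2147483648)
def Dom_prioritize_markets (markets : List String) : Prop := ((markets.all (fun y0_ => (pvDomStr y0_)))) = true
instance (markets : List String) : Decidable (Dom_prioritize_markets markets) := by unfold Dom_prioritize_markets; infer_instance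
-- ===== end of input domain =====

-- B replaces A's two seen-set filtering passes by dedupe-then-stable-sort keyed by priority index (objective: simpler); return values proved equal.

-- ===== PORT A =====
def OFFICIAL_PRIORITY_MARKETS : List String :=
  ["pitcher_strikeouts", "pitcher_outs"]

def prioritize_markets (markets : List String) : List String :=
  let st1 := OFFICIAL_PRIORITY_MARKETS.foldl
    (fun (st : List String × PySem.Set String) market =>
      if market ∈ markets ∧ market ∉ st.2 then (st.1 ++ [market], st.2.add market) else st)
    ([], PySem.Set.empty)
  let st2 := markets.foldl
    (fun (st : List String × PySem.Set String) market =>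
      if market ∉ st.2 then (st.1 ++ [market], st.2.add market) else st)
    st1
  st2.1

-- ===== PORT B =====
-- rank = OFFICIAL_PRIORITY_MARKETS.index(market) if present, else len(OFFICIAL_PRIORITY_MARKETS);
-- the membership guard makes index? a `some`, so `.getD 0` is exact here.
def pvRank (market : String) : Int :=
  if market ∈ OFFICIAL_PRIORITY_MARKETS then
    (((PySem.List.index? OFFICIAL_PRIORITY_MARKETS market).getD 0 : Nat) : Int)
  else (OFFICIAL_PRIORITY_MARKETS.length : Int)

def prioritize_markets_alt (markets : List String) : List String :=
  let deduped := PySem.List.dedup markets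
  PySem.List.sorted deduped pvRank

-- ===== PRECONDITION & SPEC =====
def Spec_prioritize_markets (markets : List String) (out : List String) : Prop := out = prioritize_markets_alt markets
instance (markets : List String) (out : List String) : Decidable (Spec_prioritize_markets markets out) := by unfold Spec_prioritize_markets; infer_instance

-- ===== CLAIM (what is proved, stated in full; the proofs are below) =====
def Claim_equal_prioritize_markets : Prop := ∀ (markets : List String), Dom_prioritize_markets markets → Spec_prioritize_markets markets (prioritize_markets markets)

-- ===== LEMMAS AND PROOFS =====

-- first-occurrence dedup of ms relative to an already-seen list s (proof-side model of both loops)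
def pvDedupFrom (s : List String) : List String → List String
  | [] => []
  | m :: ms => if m ∈ s then pvDedupFrom s ms else m :: pvDedupFrom (s ++ [m]) ms

-- the priority prefix A's first loop builds
def pvP (markets : List String) : List String :=
  (if "pitcher_strikeouts" ∈ markets then ["pitcher_strikeouts"] else []) ++
  (if "pitcher_outs" ∈ markets then ["pitcher_outs"] else [])

lemma pvRank_eq (m : String) :
    pvRank m = if m = "pitcher_strikeouts" then 0 else if m = "pitcher_outs" then 1 else 2 := by
  by_cases h1 : m = "pitcher_strikeouts"
  · subst h1; decide
  · by_cases h2 : m = "pitcher_outs"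
    · subst h2; decide
    · simp [pvRank, OFFICIAL_PRIORITY_MARKETS, h1, h2]

lemma insertBy_append_not (before : String → String → Bool) (x : String) (A B : List String)
    (h : ∀ y ∈ A, before x y = false) :
    PySem.List.insertBy before x (A ++ B) = A ++ PySem.List.insertBy before x B := by
  induction A with
  | nil => simp
  | cons a A ih =>
    have ha := h a (by simp)
    simp only [List.cons_append, PySem.List.insertBy, ha, Bool.false_eq_true, if_false]
    rw [ih (fun y hy => h y (by simp [hy]))]

lemma insertBy_all (before : String → String → Bool) (x : String) (B : List String)
    (h : ∀ y ∈ B, before x y = true) :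
    PySem.List.insertBy before x B = x :: B := by
  cases B with
  | nil => rfl
  | cons b B => simp [PySem.List.insertBy, h b (by simp)]

lemma sorted_rank_eq (d : List String) :
    PySem.List.sorted d pvRank =
      d.filter (fun m => pvRank m == 0) ++ d.filter (fun m => pvRank m == 1) ++
      d.filter (fun m => pvRank m == 2) := by
  induction d using List.reverseRecOn with
  | nil => rfl
  | append_singleton d x ih =>
    have hstep : PySem.List.sorted (d ++ [x]) pvRank =
        PySem.List.insertBy (fun a b => decide (pvRank a < pvRank b)) x
          (PySem.List.sorted d pvRank) := by
      rw [PySem.List.sorted_eq_foldl_insertBy, PySem.List.sorted_eq_foldl_insertBy,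
        List.foldl_append]
      simp
    have hr0 : ∀ y ∈ d.filter (fun m => pvRank m == 0), pvRank y = 0 := by
      intro y hy; simpa using (List.of_mem_filter hy)
    have hr1 : ∀ y ∈ d.filter (fun m => pvRank m == 1), pvRank y = 1 := by
      intro y hy; simpa using (List.of_mem_filter hy)
    have hr2 : ∀ y ∈ d.filter (fun m => pvRank m == 2), pvRank y = 2 := by
      intro y hy; simpa using (List.of_mem_filter hy)
    rw [hstep, ih]
    have hx := pvRank_eq x
    by_cases h1 : x = "pitcher_strikeouts"
    · have hx0 : pvRank x = 0 := by rw [hx]; simp [h1]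
      rw [List.append_assoc,
        insertBy_append_not _ x _ _ (by intro y hy; simp [hx0, hr0 y hy]),
        insertBy_all _ x _ (by
          intro y hy
          rcases List.mem_append.mp hy with hy | hy
          · simp [hx0, hr1 y hy]
          · simp [hx0, hr2 y hy])]
      simp [List.filter_append, hx0]
    · by_cases h2 : x = "pitcher_outs"
      · have hx1 : pvRank x = 1 := by rw [hx]; simp [h1, h2]
        rw [insertBy_append_not _ x _ _ (by
            intro y hy
            rcases List.mem_append.mp hy with hy | hy
            · simp [hx1, hr0 y hy]
            · simp [hx1, hr1 y hy]),
          insertBy_all _ x _ (by intro y hy; simp [hx1, hr2 y hy])]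
        simp [List.filter_append, hx1]
      · have hx2 : pvRank x = 2 := by rw [hx]; simp [h1, h2]
        rw [PySem.List.insertBy_of_forall_not_before _ x _ (by
          intro y hy
          rcases List.mem_append.mp hy with hy | hy
          · rcases List.mem_append.mp hy with hy | hy
            · simp [hx2, hr0 y hy]
            · simp [hx2, hr1 y hy]
          · simp [hx2, hr2 y hy])]
        simp [List.filter_append, hx2]

lemma foldl_add_eq (ms : List String) (acc : List String) :
    List.foldl PySem.Set.add acc ms = acc ++ pvDedupFrom acc ms := by
  induction ms generalizing acc with
  | nil => simp [pvDedupFrom]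
  | cons m ms ih =>
    have hadd : PySem.Set.add acc m = if m ∈ acc then acc else acc ++ [m] := by
      simp [PySem.Set.add, PySem.Set.contains, List.contains_eq_mem]
    rw [List.foldl_cons, hadd]
    by_cases hm : m ∈ acc
    · rw [if_pos hm, ih acc]; simp [pvDedupFrom, hm]
    · rw [if_neg hm, ih (acc ++ [m])]; simp [pvDedupFrom, hm]

lemma dedup_eq_dd (ms : List String) : PySem.List.dedup ms = pvDedupFrom [] ms := by
  simpa [PySem.List.dedup, PySem.Set.ofList, PySem.Set.empty] using foldl_add_eq ms []

lemma loop2_eq (ms : List String) (acc s : List String) :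
    List.foldl (fun (st : List String × PySem.Set String) market =>
      if market ∉ st.2 then (st.1 ++ [market], st.2.add market) else st) (acc, s) ms
    = (acc ++ pvDedupFrom s ms, s ++ pvDedupFrom s ms) := by
  induction ms generalizing acc s with
  | nil => simp [pvDedupFrom]
  | cons m ms ih =>
    by_cases hm : m ∈ s
    · simp only [List.foldl_cons, pvDedupFrom, hm, if_pos, not_true]
      simpa [hm] using ih acc s
    · have hadd : PySem.Set.add s m = s ++ [m] := by
        simp [PySem.Set.add, List.contains_eq_mem, hm]
      simp only [List.foldl_cons, pvDedupFrom, hm, not_false_iff, if_pos, if_neg]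
      rw [hadd, ih (acc ++ [m]) (s ++ [m])]
      simp [pvDedupFrom, hm]

lemma dd_congr (ms : List String) (s s' : List String) (h : ∀ x, x ∈ s ↔ x ∈ s') :
    pvDedupFrom s ms = pvDedupFrom s' ms := by
  induction ms generalizing s s' with
  | nil => rfl
  | cons m ms ih =>
    simp only [pvDedupFrom]
    by_cases hm : m ∈ s
    · simp [hm, (h m).mp hm]; exact ih s s' h
    · have hm' : m ∉ s' := fun hc => hm ((h m).mpr hc)
      simp [hm, hm']
      exact ih (s ++ [m]) (s' ++ [m]) (by intro x; simp [h x])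

lemma dd_filter (ms : List String) (s t : List String) :
    pvDedupFrom (s ++ t) ms = (pvDedupFrom t ms).filter (fun m => !decide (m ∈ s)) := by
  induction ms generalizing t with
  | nil => rfl
  | cons m ms ih =>
    simp only [pvDedupFrom, List.mem_append]
    by_cases ht : m ∈ t
    · simp only [ht, or_true, if_pos]
      exact ih t
    · by_cases hs : m ∈ s
      · simp only [hs, ht, true_or, if_true, if_neg, not_false_iff, List.filter_cons,
          decide_eq_true hs, Bool.not_true, Bool.false_eq_true, if_pos]
        rw [dd_congr ms (s ++ t) (s ++ (t ++ [m]))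
          (by intro x; by_cases hx : x = m <;> simp [hx, hs])]
        exact ih (t ++ [m])
      · simp only [hs, ht, or_self, if_neg, not_false_iff, List.filter_cons,
          decide_eq_false hs, Bool.not_false]
        rw [List.append_assoc, ih (t ++ [m])]
        simp

lemma mem_pvP (markets : List String) (x : String) :
    x ∈ pvP markets ↔ ((x = "pitcher_strikeouts" ∨ x = "pitcher_outs") ∧ x ∈ markets) := by
  by_cases h1 : "pitcher_strikeouts" ∈ markets <;>
  by_cases h2 : "pitcher_outs" ∈ markets <;>
    simp [pvP, h1, h2] <;> aesop

lemma loop1_eq (markets : List String) :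
    OFFICIAL_PRIORITY_MARKETS.foldl
      (fun (st : List String × PySem.Set String) market =>
        if market ∈ markets ∧ market ∉ st.2 then (st.1 ++ [market], st.2.add market) else st)
      ([], PySem.Set.empty)
    = (pvP markets, pvP markets) := by
  by_cases h1 : "pitcher_strikeouts" ∈ markets <;>
  by_cases h2 : "pitcher_outs" ∈ markets <;>
    simp [OFFICIAL_PRIORITY_MARKETS, pvP, h1, h2, PySem.Set.add, PySem.Set.empty,
      List.foldl, PySem.Set, List.contains_eq_mem]

lemma filter_single (d : List String) (a : String) (h : d.Nodup) :
    d.filter (fun m => m == a) = if a ∈ d then [a] else [] := by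
  rw [List.filter_beq]
  by_cases hm : a ∈ d
  · simp [hm, List.count_eq_one_of_mem h hm]
  · simp [hm, List.count_eq_zero_of_not_mem hm]

-- ===== VERDICT (by name: the statement is the Claim_ definition above) =====
theorem prioritize_markets_spec : Claim_equal_prioritize_markets := by
  intro markets _dom
  unfold Spec_prioritize_markets
  have hd : PySem.List.dedup markets = pvDedupFrom [] markets := dedup_eq_dd markets
  have hnodup : (pvDedupFrom [] markets).Nodup := by
    rw [← hd]; exact PySem.Set.nodup_ofList markets
  have hmemd : ∀ x, x ∈ pvDedupFrom [] markets ↔ x ∈ markets := by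
    intro x; rw [← hd]; exact PySem.Set.mem_ofList markets x
  -- A side
  have hA : prioritize_markets markets = pvP markets ++ pvDedupFrom (pvP markets) markets := by
    simp only [prioritize_markets]
    rw [loop1_eq markets, loop2_eq markets (pvP markets) (pvP markets)]
  -- B side
  have hB : prioritize_markets_alt markets =
      (pvDedupFrom [] markets).filter (fun m => pvRank m == 0) ++
      (pvDedupFrom [] markets).filter (fun m => pvRank m == 1) ++
      (pvDedupFrom [] markets).filter (fun m => pvRank m == 2) := by
    simp only [prioritize_markets_alt]
    rw [hd, sorted_rank_eq]
  rw [hA, hB]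
  -- identify the three groups
  have hf0 : (pvDedupFrom [] markets).filter (fun m => pvRank m == 0)
      = (if "pitcher_strikeouts" ∈ markets then ["pitcher_strikeouts"] else []) := by
    rw [List.filter_congr (l := pvDedupFrom [] markets)
      (q := fun m => m == "pitcher_strikeouts") (by
        intro m _
        rw [pvRank_eq]
        by_cases e1 : m = "pitcher_strikeouts"
        · simp [e1]
        · by_cases e2 : m = "pitcher_outs" <;> simp [e1, e2])]
    rw [filter_single _ _ hnodup]
    simp [hmemd]
  have hf1 : (pvDedupFrom [] markets).filter (fun m => pvRank m == 1)
      = (if "pitcher_outs" ∈ markets then ["pitcher_outs"] else []) := by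
    rw [List.filter_congr (l := pvDedupFrom [] markets)
      (q := fun m => m == "pitcher_outs") (by
        intro m _
        rw [pvRank_eq]
        by_cases e1 : m = "pitcher_strikeouts"
        · simp [e1]
        · by_cases e2 : m = "pitcher_outs" <;> simp [e1, e2])]
    rw [filter_single _ _ hnodup]
    simp [hmemd]
  have hf2 : (pvDedupFrom [] markets).filter (fun m => pvRank m == 2)
      = pvDedupFrom (pvP markets) markets := by
    have hdf := dd_filter markets (pvP markets) []
    simp only [List.append_nil] at hdf
    rw [hdf]
    apply List.filter_congr
    intro m hm
    have hmm : m ∈ markets := (hmemd m).mp hm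
    rw [pvRank_eq]
    by_cases e1 : m = "pitcher_strikeouts"
    · subst e1
      have hp : "pitcher_strikeouts" ∈ pvP markets := (mem_pvP markets _).mpr ⟨Or.inl rfl, hmm⟩
      simp [hp]
    · by_cases e2 : m = "pitcher_outs"
      · subst e2
        have hp : "pitcher_outs" ∈ pvP markets := (mem_pvP markets _).mpr ⟨Or.inr rfl, hmm⟩
        simp [e1, hp]
      · have hp : m ∉ pvP markets := by
          intro hc
          rcases (mem_pvP markets m).mp hc with ⟨h, _⟩
          rcases h with h | h
          · exact e1 h
          · exact e2 h
        simp [e1, e2, hp]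
  rw [hf0, hf1, hf2]
  simp [pvP, List.append_assoc]
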